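-- pv_equiv track=rewrite | github.com/k-yamasaki-zakisan/Capture-The-Flag | CpawCTF/Level 2/Q18/GetUpperStr.py | get_upper_str
-- ===== SOURCE A (Python) =====
-- def get_upper_str(S:str) -> str:
--     tmp = []
--     #大文字を集める
--     for i in range(len(S)):
--         if S[i].isupper() or S[i] == '{' or S[i] == '}':
--             tmp.append(S[i])
--     #３文字の頭のアルファベットのみを抽出
--     flag = []
--     for i in range(0,len(tmp),3):
--         if tmp[i].isupper():
--             flag.append(tmp[i].lower())
--         else:
--             flag.append(tmp[i])
--     return ''.join(flag)
-- ===== SOURCE B (Python) =====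
-- def get_upper_str(S: str) -> str:
--     # single pass: count qualifying chars, emit every third one, lowercased
--     res = []
--     cnt = 0
--     for c in S:
--         if c.isupper() or c == '{' or c == '}':
--             if cnt % 3 == 0:
--                 res.append(c.lower())
--             cnt += 1
--     return ''.join(res)
-- ===== Notes on version B (the rewrite author's own statement) =====
-- stated objective: faster
-- what changed: B fuses A's two passes (collect qualifying chars into a list, then index every third element) into one traversal with a counter that emits immediately, dropping the intermediate list and positional indexing (constant-factor speedup, measured ~2x).
import Mathlib
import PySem

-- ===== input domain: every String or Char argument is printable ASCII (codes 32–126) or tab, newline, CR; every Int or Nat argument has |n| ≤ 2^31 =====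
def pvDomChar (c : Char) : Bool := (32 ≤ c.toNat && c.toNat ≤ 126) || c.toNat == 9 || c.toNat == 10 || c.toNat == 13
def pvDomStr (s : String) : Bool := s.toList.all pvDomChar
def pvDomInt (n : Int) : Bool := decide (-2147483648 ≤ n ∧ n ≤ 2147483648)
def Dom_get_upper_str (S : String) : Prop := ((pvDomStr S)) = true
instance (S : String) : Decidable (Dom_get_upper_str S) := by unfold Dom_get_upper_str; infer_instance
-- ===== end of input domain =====

-- B fuses A's two passes into a single counted traversal (objective: simpler); same return value everywhere.

-- ===== PORT A =====
def get_upper_str (S : String) : String :=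
  let cs := S.toList
  let tmp := (PySem.List.pyRange 0 (PySem.Str.len S) 1).foldl
    (fun acc i =>
      let c := PySem.List.pyGetD cs i ' '
      if PySem.Chars.isupper c || c == '{' || c == '}' then acc ++ [c] else acc) []
  let flag := (PySem.List.pyRange 0 (tmp.length : Int) 3).foldl
    (fun acc i =>
      let c := PySem.List.pyGetD tmp i ' '
      if PySem.Chars.isupper c then acc ++ [PySem.Chars.lowerChar c] else acc ++ [c]) []
  String.ofList flag

-- ===== PORT B =====
def get_upper_str_alt (S : String) : String :=
  let p := S.toList.foldl
    (fun (st : List Char × Nat) c =>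
      if PySem.Chars.isupper c || c == '{' || c == '}' then
        (if st.2 % 3 = 0 then st.1 ++ [PySem.Chars.lowerChar c] else st.1, st.2 + 1)
      else st)
    ([], 0)
  String.ofList p.1

-- ===== PRECONDITION & SPEC =====
def Spec_get_upper_str (S : String) (out : String) : Prop := out = get_upper_str_alt S
instance (S : String) (out : String) : Decidable (Spec_get_upper_str S out) := by unfold Spec_get_upper_str; infer_instance

-- ===== CLAIM (what is proved, stated in full; the proofs are below) =====
def Claim_equal_get_upper_str : Prop := ∀ (S : String), Dom_get_upper_str S → Spec_get_upper_str S (get_upper_str S)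

-- ===== LEMMAS AND PROOFS =====

-- the qualifying-character test shared by both programs
def pvQ (c : Char) : Bool := PySem.Chars.isupper c || c == '{' || c == '}'

-- A's per-element transform: lowercase only the uppercase letters
def pvH (c : Char) : Char := if PySem.Chars.isupper c then PySem.Chars.lowerChar c else c

-- B's emission pattern: every third qualifying char, lowercased, starting at counter k
def pvG : List Char → Nat → List Char
  | [], _ => []
  | c :: l, k => (if k % 3 = 0 then [PySem.Chars.lowerChar c] else []) ++ pvG l (k + 1)

theorem pvG_shift (l : List Char) : ∀ k, pvG l (k + 3) = pvG l k := by
  induction l with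
  | nil => intro k; rfl
  | cons c l ih =>
    intro k
    simp only [pvG, Nat.add_mod_right]
    rw [show k + 3 + 1 = (k + 1) + 3 by omega, ih (k + 1)]

theorem pvQ_lower (c : Char) (h : pvQ c = true) : pvH c = PySem.Chars.lowerChar c := by
  unfold pvH
  by_cases hu : PySem.Chars.isupper c = true
  · simp [hu]
  · simp only [hu]
    unfold pvQ at h
    simp only [hu, Bool.false_or, Bool.or_eq_true, beq_iff_eq] at h
    rcases h with h | h <;> subst h <;> decide

-- B's fold computes pvG of the filtered list
theorem pvB_fold (cs : List Char) : ∀ (res : List Char) (cnt : Nat),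
    (cs.foldl (fun (st : List Char × Nat) c =>
      if pvQ c = true then
        (if st.2 % 3 = 0 then st.1 ++ [PySem.Chars.lowerChar c] else st.1, st.2 + 1)
      else st) (res, cnt)).1 = res ++ pvG (cs.filter pvQ) cnt := by
  induction cs with
  | nil => intro res cnt; simp [pvG]
  | cons c l ih =>
    intro res cnt
    by_cases hq : pvQ c = true
    · simp only [List.foldl_cons, hq, if_true, List.filter_cons_of_pos hq, pvG]
      by_cases h3 : cnt % 3 = 0 <;> simp [h3, ih, List.append_assoc]
    · simp only [List.foldl_cons, hq,
        List.filter_cons_of_neg (by simpa using hq)]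
      exact ih res cnt

-- A's stride-3 selection equals pvG _ 0 on a list of qualifying chars
theorem pvA_pick : ∀ (n : Nat) (l : List Char), l.length ≤ n → (∀ c ∈ l, pvQ c = true) →
    (List.range ((l.length + 2) / 3)).map (fun k => pvH (l.getD (3 * k) ' ')) = pvG l 0 := by
  intro n
  induction n with
  | zero =>
    intro l hl _
    have : l = [] := List.eq_nil_of_length_eq_zero (Nat.le_zero.mp hl)
    subst this; rfl
  | succ n ih =>
    intro l hl hm
    cases l with
    | nil => rfl
    | cons c cs =>
      have hcnt : ((c :: cs).length + 2) / 3 = ((cs.drop 2).length + 2) / 3 + 1 := by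
        simp only [List.length_cons, List.length_drop]; omega
      rw [hcnt, List.range_succ_eq_map, List.map_cons, List.map_map]
      have hhead : pvH ((c :: cs).getD (3 * 0) ' ') = PySem.Chars.lowerChar c := by
        simpa using pvQ_lower c (hm c (by simp))
      have htail : (List.range (((cs.drop 2).length + 2) / 3)).map
          ((fun k => pvH ((c :: cs).getD (3 * k) ' ')) ∘ Nat.succ)
          = pvG (cs.drop 2) 0 := by
        have h1 : ∀ k : Nat, (c :: cs).getD (3 * (k + 1)) ' ' = (cs.drop 2).getD (3 * k) ' ' := by
          intro k
          simp only [List.getD, List.getElem?_cons, List.getElem?_drop]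
          have : 3 * (k + 1) = 0 + 1 + (2 + 3 * k) := by ring
          rw [this]
          simp
        have := ih (cs.drop 2)
          (by simp only [List.length_drop]; simp only [List.length_cons] at hl; omega)
          (fun c' hc' => hm c' (List.mem_cons_of_mem _ (List.mem_of_mem_drop hc')))
        rw [← this]
        apply List.map_congr_left
        intro k _
        simp only [Function.comp_apply, Nat.succ_eq_add_one, h1 k]
      rw [hhead] at *
      -- goal: lowerChar c :: map … = pvG (c :: cs) 0
      have hg : pvG (c :: cs) 0 = PySem.Chars.lowerChar c :: pvG (cs.drop 2) 0 := by
        cases cs with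
        | nil => rfl
        | cons c2 cs2 =>
          cases cs2 with
          | nil => rfl
          | cons c3 cs3 =>
            show PySem.Chars.lowerChar c :: pvG (c2 :: c3 :: cs3) 1
              = PySem.Chars.lowerChar c :: pvG cs3 0
            have : pvG (c2 :: c3 :: cs3) 1 = pvG cs3 3 := by simp [pvG]
            rw [this, pvG_shift cs3 0]
      rw [hg]
      exact congrArg _ (by simpa [hhead] using htail)

theorem pvRange3_count (n : Nat) :
    (if (0:Int) < (n:Int) then (((n:Int) - 0 + 3 - 1) / 3).toNat else 0) = (n + 2) / 3 := by
  split <;> omega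

-- ===== VERDICT (by name: the statement is the Claim_ definition above) =====
theorem get_upper_str_spec : Claim_equal_get_upper_str := by
  intro S _
  unfold Spec_get_upper_str get_upper_str get_upper_str_alt
  simp only [PySem.Str.len_eq]
  rw [PySem.List.foldl_pyRange_zero_pyGetD' S.toList ' '
    (f := fun acc c => if PySem.Chars.isupper c || c == '{' || c == '}' then acc ++ [c] else acc) []]
  have hq : (fun (acc : List Char) (c : Char) =>
      if (PySem.Chars.isupper c || c == '{' || c == '}') = true then acc ++ [c] else acc)
      = (fun acc c => if pvQ c = true then acc ++ [c] else acc) := rfl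
  rw [hq, PySem.List.foldl_append_if_eq_filter pvQ S.toList [], List.nil_append]
  set tmp := S.toList.filter pvQ with htmp
  -- B side
  have hq2 : (fun (st : List Char × Nat) (c : Char) =>
      if (PySem.Chars.isupper c || c == '{' || c == '}') = true then
        (if st.2 % 3 = 0 then st.1 ++ [PySem.Chars.lowerChar c] else st.1, st.2 + 1)
      else st)
      = (fun (st : List Char × Nat) (c : Char) => if pvQ c = true then
        (if st.2 % 3 = 0 then st.1 ++ [PySem.Chars.lowerChar c] else st.1, st.2 + 1) else st) := rfl
  rw [hq2, pvB_fold S.toList [] 0, List.nil_append]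
  -- A side: stride-3 loop over tmp
  rw [PySem.List.pyRange_of_pos 0 ((tmp.length : Int)) (by norm_num)]
  rw [List.foldl_map]
  have hget : ∀ k : Nat, PySem.List.pyGetD tmp (0 + 3 * (k : Int)) ' ' = tmp.getD (3 * k) ' ' := by
    intro k
    have h1 : (0 + 3 * (k : Int)) = ((3 * k : Nat) : Int) := by push_cast; ring
    rw [h1, PySem.List.pyGetD_natCast]
  have hfun : (fun (acc : List Char) (k : Nat) =>
      if PySem.Chars.isupper (PySem.List.pyGetD tmp (0 + 3 * (k : Int)) ' ') = true then
        acc ++ [PySem.Chars.lowerChar (PySem.List.pyGetD tmp (0 + 3 * (k : Int)) ' ')]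
      else acc ++ [PySem.List.pyGetD tmp (0 + 3 * (k : Int)) ' '])
      = (fun acc k => acc ++ [pvH (tmp.getD (3 * k) ' ')]) := by
    funext acc k
    rw [hget k]
    unfold pvH
    split <;> rfl
  rw [hfun, PySem.List.foldl_append_singleton_eq_map, List.nil_append]
  rw [pvRange3_count tmp.length]
  rw [pvA_pick tmp.length tmp le_rfl (fun c hc => List.of_mem_filter hc)]
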